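-- pv_equiv track=rewrite | github.com/arteiro-tiago/AI-Assignment1 | pancake_brain.py | top_heuristic_raw
-- ===== SOURCE A (Python) =====
-- def gap_raw(stack):
--     n = len(stack)
--     gaps = sum(1 for i in range(n - 1) if abs(stack[i] - stack[i + 1]) != 1)
--     if stack[-1] != n:
--         gaps += 1
--     return gaps
--
-- def top_heuristic_raw(stack):
--     base = gap_raw(stack)
--     if base == 0:
--         return 0
--     n = len(stack)
--     for i in range(1, n):
--         child = stack[:i + 1][::-1] + stack[i + 1:]
--         if gap_raw(child) < base:
--             return base            # existe um flip que melhora então devolve o valor base sem penalidade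
--     return base + 1                # nenhum flip melhora então adiciona penalidade de +1
-- ===== SOURCE B (Python) =====
-- def top_heuristic_raw(stack):
--     # O(n): a flip of the prefix [0..i] (i >= 1) only changes the boundary pair
--     # (stack[i], stack[i+1]) into (stack[0], stack[i+1]) (interior pairs survive,
--     # |.| is symmetric); the full reversal (i == n-1) instead moves stack[0] last.
--     # So compute the base gap count and, in the same pass, whether any flip
--     # removes a gap, instead of rebuilding and rescanning every child.
--     n = len(stack)
--     top = stack[0]
--     base = 0
--     improves = False
--     prev = top
--     skip = True  # the first boundary is interior to every flipped prefix
--     for cur in stack[1:]: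
--         if abs(prev - cur) != 1:
--             base += 1
--             if not skip and abs(top - cur) == 1:
--                 improves = True
--         prev = cur
--         skip = False
--     if stack[-1] != n:
--         base += 1
--         if top == n:  # full reversal puts the old top last
--             improves = True
--     if base == 0:
--         return 0
--     return base if improves else base + 1
-- ===== Notes on version B (the rewrite author's own statement) =====
-- stated objective: faster
-- what changed: Instead of rebuilding every prefix-flipped child list and rescanning it with gap_raw, B computes the base gap count and, in the same single pass, whether some flip improves it, using the fact that a flip only changes one boundary pair (or, for the full reversal, the last element).
import Mathlib
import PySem

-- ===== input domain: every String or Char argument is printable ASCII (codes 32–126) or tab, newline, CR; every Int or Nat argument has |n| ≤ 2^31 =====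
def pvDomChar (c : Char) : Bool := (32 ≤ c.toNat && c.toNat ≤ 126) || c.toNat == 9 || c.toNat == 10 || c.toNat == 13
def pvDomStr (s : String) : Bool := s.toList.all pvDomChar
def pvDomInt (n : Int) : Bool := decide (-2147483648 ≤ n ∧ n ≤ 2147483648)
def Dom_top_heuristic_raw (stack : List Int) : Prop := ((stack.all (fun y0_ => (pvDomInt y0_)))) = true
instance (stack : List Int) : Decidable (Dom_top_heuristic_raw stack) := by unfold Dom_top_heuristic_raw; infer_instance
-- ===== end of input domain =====

-- B replaces A's rebuild-and-rescan of every prefix-flipped child (O(n^2)) by one pass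
-- that derives each flip's effect from the single boundary pair it changes (O(n)).

-- ===== PORT A =====
-- helper: Python's gap_raw (in-range index reads ported with pyGetD; stack[-1] raises on [])
def pvGapRaw (stack : List Int) : Int :=
  let n : Int := stack.length
  let gaps : Int := ((PySem.List.pyRange 0 (n - 1) 1).map (fun i =>
      if (PySem.List.pyGetD stack i 0 - PySem.List.pyGetD stack (i + 1) 0).natAbs ≠ 1 then (1 : Int) else 0)).sum
  if PySem.List.pyGetD stack (-1) 0 ≠ n then gaps + 1 else gaps

-- port of A; the early-returning for-loop is the List.any over range(1, n), and
-- 'stack[:i+1][::-1]' is the reversed slice (List.reverse is exact on lists)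
def top_heuristic_raw (stack : List Int) : Int :=
  let base := pvGapRaw stack
  if base = 0 then 0
  else
    let n : Int := stack.length
    if (PySem.List.pyRange 1 n 1).any (fun i =>
        let child := (PySem.List.slice stack none (some (i + 1))).reverse ++
                     PySem.List.slice stack (some (i + 1)) none
        pvGapRaw child < base)
    then base
    else base + 1

-- ===== PORT B =====
-- the body of B's for-loop over stack[1:], with loop state (base, improves, prev, skip)
def pvStepB (top : Int) (st : Int × Bool × Int × Bool) (cur : Int) : Int × Bool × Int × Bool :=
  let (base, improves, prev, skip) := st
  if (prev - cur).natAbs ≠ 1 then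
    (base + 1, improves || (!skip && ((top - cur).natAbs == 1)), cur, false)
  else
    (base, improves, cur, false)

def top_heuristic_raw_alt (stack : List Int) : Int :=
  let n : Int := stack.length
  let top := PySem.List.pyGetD stack 0 0
  let st := (PySem.List.slice stack (some 1) none).foldl (pvStepB top) (0, false, top, true)
  let base := st.1
  let improves := st.2.1
  let (base, improves) :=
    if PySem.List.pyGetD stack (-1) 0 ≠ n then
      (base + 1, improves || (top == n))
    else (base, improves)
  if base = 0 then 0
  else if improves then base else base + 1

-- ===== PRECONDITION & SPEC =====
-- Python A raises IndexError (stack[-1]) exactly on the empty list, so Pre_ excludes it.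
def Pre_top_heuristic_raw (stack : List Int) : Prop := stack ≠ []
instance (stack : List Int) : Decidable (Pre_top_heuristic_raw stack) := by
  unfold Pre_top_heuristic_raw; infer_instance

def pvWitness_top_heuristic_raw : List Int := [2, 1]

def Spec_top_heuristic_raw (stack : List Int) (out : Int) : Prop := out = top_heuristic_raw_alt stack
instance (stack : List Int) (out : Int) : Decidable (Spec_top_heuristic_raw stack out) := by
  unfold Spec_top_heuristic_raw; infer_instance

-- ===== CLAIM (what is proved, stated in full; the proofs are below) =====
def Claim_equal_top_heuristic_raw : Prop := ∀ (stack : List Int), Dom_top_heuristic_raw stack → Pre_top_heuristic_raw stack → Spec_top_heuristic_raw stack (top_heuristic_raw stack)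

-- ===== LEMMAS AND PROOFS =====

def gapPairs : List Int → Int
  | a :: b :: t => (if (a - b).natAbs ≠ 1 then 1 else 0) + gapPairs (b :: t)
  | _ => 0

def impFrom (top : Int) : Int → List Int → Bool
  | prev, c :: t => (decide ((prev - c).natAbs ≠ 1) && ((top - c).natAbs == 1)) || impFrom top c t
  | _, [] => false

def MidCond (x : Int) (xs : List Int) : Prop :=
  (∃ k : Nat, 1 ≤ k ∧ k + 1 < (x :: xs).length ∧
      ((x :: xs).getD k 0 - (x :: xs).getD (k + 1) 0).natAbs ≠ 1 ∧
      (x - (x :: xs).getD (k + 1) 0).natAbs = 1)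
  ∨ (2 ≤ (x :: xs).length ∧ (x :: xs).getLast?.getD 0 ≠ ((x :: xs).length : Int)
      ∧ x = ((x :: xs).length : Int))

lemma gapPairs_nonneg (l : List Int) : 0 ≤ gapPairs l := by
  match l with
  | [] => simp [gapPairs]
  | [_] => simp [gapPairs]
  | a :: b :: t =>
    have := gapPairs_nonneg (b :: t)
    simp only [gapPairs]
    split <;> omega

lemma sumRangePairs (l : List Int) :
    ((List.range (l.length - 1)).map (fun k =>
      if (l.getD k 0 - l.getD (k + 1) 0).natAbs ≠ 1 then (1 : Int) else 0)).sum = gapPairs l := by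
  match l with
  | [] => simp [gapPairs]
  | [_] => simp [gapPairs]
  | a :: b :: t =>
    have ih := sumRangePairs (b :: t)
    simp only [List.length_cons, Nat.add_sub_cancel] at ih ⊢
    rw [List.range_succ_eq_map, List.map_cons, List.map_map, List.sum_cons]
    have hfun : ((fun k => if ((a :: b :: t).getD k 0 - (a :: b :: t).getD (k + 1) 0).natAbs ≠ 1 then (1 : Int) else 0) ∘ Nat.succ)
        = (fun k => if ((b :: t).getD k 0 - (b :: t).getD (k + 1) 0).natAbs ≠ 1 then (1 : Int) else 0) := by
      funext k
      simp [Function.comp]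
    rw [hfun, ih]
    simp [gapPairs]

lemma gapPairs_append (xs : List Int) (hx : xs ≠ []) (y : Int) (ys : List Int) :
    gapPairs (xs ++ y :: ys) =
      gapPairs xs + (if ((xs.getLast?.getD 0) - y).natAbs ≠ 1 then 1 else 0) + gapPairs (y :: ys) := by
  match xs with
  | [a] => simp [gapPairs]
  | a :: b :: t =>
    have ih := gapPairs_append (b :: t) (by simp) y ys
    simp only [List.cons_append, gapPairs] at ih ⊢
    rw [ih, List.getLast?_cons_cons]
    ring

lemma gapPairs_concat (xs : List Int) (hx : xs ≠ []) (y : Int) :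
    gapPairs (xs ++ [y]) =
      gapPairs xs + (if ((xs.getLast?.getD 0) - y).natAbs ≠ 1 then 1 else 0) := by
  have := gapPairs_append xs hx y []
  simpa [gapPairs] using this

lemma gapPairs_reverse (l : List Int) : gapPairs l.reverse = gapPairs l := by
  match l with
  | [] => rfl
  | [_] => rfl
  | a :: b :: t =>
    have ih := gapPairs_reverse (b :: t)
    rw [List.reverse_cons, gapPairs_concat _ (by simp) a, ih, List.getLast?_reverse]
    simp only [List.head?_cons, Option.getD_some, gapPairs]
    have h2 : (b - a).natAbs = (a - b).natAbs := by omega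
    simp only [h2]
    ring

lemma impFrom_iff (top : Int) (l : List Int) : ∀ prev : Int,
    (impFrom top prev l = true ↔ ∃ k : Nat, k + 1 < (prev :: l).length ∧
      ((prev :: l).getD k 0 - (prev :: l).getD (k + 1) 0).natAbs ≠ 1 ∧
      (top - (prev :: l).getD (k + 1) 0).natAbs = 1) := by
  induction l with
  | nil => intro prev; simp [impFrom]
  | cons c t ih =>
    intro prev
    simp only [impFrom, Bool.or_eq_true, Bool.and_eq_true, decide_eq_true_iff, beq_iff_eq, ih c]
    constructor
    · rintro (⟨h1, h2⟩ | ⟨k, hk, h1, h2⟩)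
      · exact ⟨0, by simp, by simpa using h1, by simpa using h2⟩
      · exact ⟨k + 1, by simpa using hk, by simpa using h1, by simpa using h2⟩
    · rintro ⟨k, hk, h1, h2⟩
      cases k with
      | zero => exact Or.inl ⟨by simpa using h1, by simpa using h2⟩
      | succ k' => exact Or.inr ⟨k', by simpa using hk, by simpa using h1, by simpa using h2⟩

lemma foldB_char (top : Int) (l : List Int) :
    ∀ (base : Int) (imp : Bool) (prev : Int),
      ((l.foldl (pvStepB top) (base, imp, prev, false)).1 = base + gapPairs (prev :: l) ∧
       (l.foldl (pvStepB top) (base, imp, prev, false)).2.1 = (imp || impFrom top prev l)) := by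
  induction l with
  | nil => intro base imp prev; simp [gapPairs, impFrom]
  | cons c t ih =>
    intro base imp prev
    simp only [List.foldl_cons, pvStepB]
    by_cases h : (prev - c).natAbs ≠ 1
    · simp only [if_pos h]
      obtain ⟨h1, h2⟩ := ih (base + 1) (imp || (!false && ((top - c).natAbs == 1))) c
      refine ⟨?_, ?_⟩
      · rw [h1]; simp only [gapPairs, if_pos h]; ring
      · rw [h2]; simp only [impFrom, Bool.not_false, Bool.true_and, decide_eq_true h]
        simp [Bool.or_assoc]
    · simp only [if_neg h]
      obtain ⟨h1, h2⟩ := ih base imp c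
      refine ⟨?_, ?_⟩
      · rw [h1]; simp only [gapPairs, if_neg h]; ring
      · rw [h2]; simp only [impFrom]
        have : decide ((prev - c).natAbs ≠ 1) = false := by simpa using h
        simp [this]

lemma foldB_start (top x : Int) (xs : List Int) :
    ((xs.foldl (pvStepB top) (0, false, x, true)).1 = gapPairs (x :: xs) ∧
     (xs.foldl (pvStepB top) (0, false, x, true)).2.1 =
       (match xs with | [] => false | c :: t => impFrom top c t)) := by
  match xs with
  | [] => simp [gapPairs]
  | c :: t =>
    simp only [List.foldl_cons, pvStepB]
    by_cases h : (x - c).natAbs ≠ 1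
    · simp only [if_pos h]
      obtain ⟨h1, h2⟩ := foldB_char top t (0 + 1) (false || (!true && ((top - c).natAbs == 1))) c
      refine ⟨?_, ?_⟩
      · rw [h1]; simp only [gapPairs, if_pos h]; ring
      · rw [h2]; simp
    · simp only [if_neg h]
      obtain ⟨h1, h2⟩ := foldB_char top t 0 false c
      refine ⟨?_, ?_⟩
      · rw [h1]; simp [gapPairs, if_neg h]
      · rw [h2]; simp

lemma pvGapRaw_eq (l : List Int) (h : l ≠ []) :
    pvGapRaw l = gapPairs l + (if l.getLast h ≠ (l.length : Int) then 1 else 0) := by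
  have hlen : 1 ≤ l.length := List.length_pos_of_ne_nil h
  simp only [pvGapRaw]
  have hc : ((l.length : Int) - 1) = ((l.length - 1 : Nat) : Int) := by omega
  rw [hc, PySem.List.pyRange_zero_natCast, List.map_map]
  have hfun : ((fun i => if (PySem.List.pyGetD l i 0 - PySem.List.pyGetD l (i + 1) 0).natAbs ≠ 1 then (1 : Int) else 0) ∘ (fun k : Nat => (k : Int)))
      = (fun k : Nat => if (l.getD k 0 - l.getD (k + 1) 0).natAbs ≠ 1 then (1 : Int) else 0) := by
    funext k
    have h1 : ((k : Int) + 1) = ((k + 1 : Nat) : Int) := by push_cast; ring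
    simp only [Function.comp_apply]
    rw [h1]
    simp only [PySem.List.pyGetD_natCast]
  rw [hfun, sumRangePairs, PySem.List.pyGetD_neg_one l 0 h]
  split <;> simp

lemma pvGapRaw_eq' (l : List Int) (h : l ≠ []) :
    pvGapRaw l = gapPairs l + (if l.getLast?.getD 0 ≠ (l.length : Int) then 1 else 0) := by
  rw [pvGapRaw_eq l h, List.getLast?_eq_some_getLast h]
  rfl

lemma pvGapRaw_reverse (x : Int) (xs : List Int) :
    pvGapRaw (x :: xs).reverse = gapPairs (x :: xs) + (if x ≠ ((x :: xs).length : Int) then 1 else 0) := by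
  have h : (x :: xs).reverse ≠ [] := by simp
  rw [pvGapRaw_eq _ h, gapPairs_reverse]
  have hl : (x :: xs).reverse.getLast h = x := by
    have h2 : (x :: xs).reverse.getLast? = (x :: xs).head? := List.getLast?_reverse
    rw [List.getLast?_eq_some_getLast h] at h2
    exact Option.some.inj h2
  rw [hl, List.length_reverse]

lemma child_gap_mid (x : Int) (xs : List Int) (k : Nat) (hk2 : k + 1 < (x :: xs).length) :
    pvGapRaw ((List.take (k + 1) (x :: xs)).reverse ++ List.drop (k + 1) (x :: xs))
      = gapPairs (x :: xs)
        - (if ((x :: xs).getD k 0 - (x :: xs).getD (k + 1) 0).natAbs ≠ 1 then 1 else 0)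
        + (if (x - (x :: xs).getD (k + 1) 0).natAbs ≠ 1 then 1 else 0)
        + (if (x :: xs).getLast?.getD 0 ≠ (((x :: xs).length : Nat) : Int) then 1 else 0) := by
  set L := x :: xs with hL
  have hkL : k + 1 < L.length := hk2
  have hP : List.take (k + 1) L ≠ [] := by
    have : (List.take (k + 1) L).length = k + 1 := by
      rw [List.length_take]; omega
    intro hnil; rw [hnil] at this; simp at this
  have hSne : List.drop (k + 1) L ≠ [] := by
    have : (List.drop (k + 1) L).length = L.length - (k + 1) := List.length_drop
    intro hnil; rw [hnil] at this; simp at this; omega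
  have hchild : (List.take (k + 1) L).reverse ++ List.drop (k + 1) L ≠ [] := by
    simp [hP]
  have hS : List.drop (k + 1) L = L[k + 1] :: List.drop (k + 2) L := List.drop_eq_getElem_cons hkL
  -- head of the prefix is x
  have hhead : (List.take (k + 1) L).head?.getD 0 = x := by
    rw [hL, List.take_succ_cons]; rfl
  -- last of the prefix is L[k]
  have hlastP : (List.take (k + 1) L).getLast?.getD 0 = L.getD k 0 := by
    rw [List.getLast?_eq_getElem?]
    have hlen : (List.take (k + 1) L).length = k + 1 := by rw [List.length_take]; omega
    rw [hlen]
    simp only [Nat.add_sub_cancel, List.getElem?_take]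
    rw [if_pos (by omega), List.getD_eq_getElem?_getD]
  -- gapPairs of the child
  have hgc : gapPairs ((List.take (k + 1) L).reverse ++ List.drop (k + 1) L)
      = gapPairs (List.take (k + 1) L) + (if (x - L[k + 1]).natAbs ≠ 1 then 1 else 0)
        + gapPairs (List.drop (k + 1) L) := by
    rw [hS, gapPairs_append _ (by simp [hP]) _ _, gapPairs_reverse, List.getLast?_reverse, hhead]
  -- gapPairs of L split at k+1
  have hgL : gapPairs L
      = gapPairs (List.take (k + 1) L) + (if (L.getD k 0 - L[k + 1]).natAbs ≠ 1 then 1 else 0)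
        + gapPairs (List.drop (k + 1) L) := by
    conv_lhs => rw [← List.take_append_drop (k + 1) L, hS]
    rw [gapPairs_append _ hP _ _, hlastP, ← hS]
  -- last element of the child = last element of L
  have hlast : ((List.take (k + 1) L).reverse ++ List.drop (k + 1) L).getLast? = L.getLast? := by
    have h1 : ((List.take (k + 1) L).reverse ++ List.drop (k + 1) L).getLast? = (List.drop (k + 1) L).getLast? :=
      List.getLast?_append_of_ne_nil _ hSne
    have h2 : L.getLast? = (List.drop (k + 1) L).getLast? := by
      conv_lhs => rw [← List.take_append_drop (k + 1) L]
      exact List.getLast?_append_of_ne_nil _ hSne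
    rw [h1, h2]
  have hgc2 := hgc
  -- length of the child = length of L
  have hlen : ((List.take (k + 1) L).reverse ++ List.drop (k + 1) L).length = L.length := by
    simp [List.length_take, List.length_drop]; omega
  rw [pvGapRaw_eq' _ hchild, hgc2, hlen, hgL]
  rw [hlast]
  have hgd : L.getD (k + 1) 0 = L[k + 1] := List.getD_eq_getElem L 0 hkL
  rw [hgd]
  ring

lemma ite01 (c : Prop) [Decidable c] : (if c then (1 : Int) else 0) = 0 ∨ (if c then (1 : Int) else 0) = 1 := by
  split <;> simp

lemma ite_eq_one_iff (c : Prop) [Decidable c] : ((if c then (1 : Int) else 0) = 1) ↔ c := by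
  split <;> simp_all

lemma ite_eq_zero_iff (c : Prop) [Decidable c] : ((if c then (1 : Int) else 0) = 0) ↔ ¬ c := by
  split <;> simp_all

lemma lt_aux (g p o nw : Int) (ho : o = 0 ∨ o = 1) (hn : nw = 0 ∨ nw = 1) :
    (g - o + nw + p < g + p) ↔ (o = 1 ∧ nw = 0) := by omega

lemma lt_aux2 (g a b : Int) (ha : a = 0 ∨ a = 1) (hb : b = 0 ∨ b = 1) :
    (g + a < g + b) ↔ (b = 1 ∧ a = 0) := by omega

lemma anyA_iff (x : Int) (xs : List Int) :
    (((PySem.List.pyRange 1 (((x :: xs).length : Int)) 1).any (fun i =>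
        pvGapRaw ((PySem.List.slice (x :: xs) none (some (i + 1))).reverse ++
                  PySem.List.slice (x :: xs) (some (i + 1)) none) < pvGapRaw (x :: xs))) = true)
    ↔ MidCond x xs := by
  have hne : (x :: xs) ≠ [] := by simp
  rw [List.any_eq_true]
  have hbase := pvGapRaw_eq' (x :: xs) hne
  constructor
  · rintro ⟨i, hmem, hp⟩
    rw [PySem.List.mem_pyRange_one] at hmem
    obtain ⟨h1, h2⟩ := hmem
    have hik : i = ((i.toNat : Nat) : Int) := by omega
    set k : Nat := i.toNat with hk
    have hk1 : 1 ≤ k := by omega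
    have hkl : k < (x :: xs).length := by omega
    rw [hik] at hp
    have hcast : ((k : Int) + 1) = ((k + 1 : Nat) : Int) := by push_cast; ring
    rw [hcast, PySem.List.slice_to_natCast, PySem.List.slice_from_natCast] at hp
    rw [decide_eq_true_eq] at hp
    by_cases hlt : k + 1 < (x :: xs).length
    · left
      refine ⟨k, hk1, hlt, ?_, ?_⟩
      · rw [child_gap_mid x xs k hlt, hbase,
          lt_aux _ _ _ _ (ite01 _) (ite01 _), ite_eq_one_iff, ite_eq_zero_iff] at hp
        exact hp.1
      · rw [child_gap_mid x xs k hlt, hbase,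
          lt_aux _ _ _ _ (ite01 _) (ite01 _), ite_eq_one_iff, ite_eq_zero_iff] at hp
        have := hp.2
        omega
    · have hkeq : k + 1 = (x :: xs).length := by omega
      right
      have htake : List.take (k + 1) (x :: xs) = (x :: xs) := List.take_of_length_le (by omega)
      have hdrop : List.drop (k + 1) (x :: xs) = ([] : List Int) := List.drop_eq_nil_of_le (by omega)
      rw [htake, hdrop, List.append_nil, pvGapRaw_reverse, hbase,
        lt_aux2 _ _ _ (ite01 _) (ite01 _), ite_eq_one_iff, ite_eq_zero_iff] at hp
      refine ⟨by omega, hp.1, by have := hp.2; omega⟩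
  · intro hmid
    rcases hmid with ⟨k, hk1, hlt, hbad, hgood⟩ | ⟨hlen2, hpen, hxn⟩
    · refine ⟨(k : Int), ?_, ?_⟩
      · rw [PySem.List.mem_pyRange_one]
        constructor
        · omega
        · omega
      · have hcast : ((k : Int) + 1) = ((k + 1 : Nat) : Int) := by push_cast; ring
        rw [hcast, PySem.List.slice_to_natCast, PySem.List.slice_from_natCast,
          decide_eq_true_eq, child_gap_mid x xs k hlt, hbase,
          lt_aux _ _ _ _ (ite01 _) (ite01 _), ite_eq_one_iff, ite_eq_zero_iff]
        exact ⟨hbad, by omega⟩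
    · refine ⟨(((x :: xs).length - 1 : Nat) : Int), ?_, ?_⟩
      · rw [PySem.List.mem_pyRange_one]
        constructor
        · omega
        · omega
      · have hcast : ((((x :: xs).length - 1 : Nat) : Int) + 1) = (((x :: xs).length : Nat) : Int) := by
          omega
        rw [hcast, PySem.List.slice_to_natCast, PySem.List.slice_from_natCast,
          decide_eq_true_eq]
        have htake : List.take (x :: xs).length (x :: xs) = (x :: xs) := List.take_of_length_le (by omega)
        have hdrop : List.drop (x :: xs).length (x :: xs) = ([] : List Int) := List.drop_eq_nil_of_le (by omega)
        rw [htake, hdrop, List.append_nil, pvGapRaw_reverse, hbase,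
          lt_aux2 _ _ _ (ite01 _) (ite01 _), ite_eq_one_iff, ite_eq_zero_iff]
        exact ⟨hpen, by omega⟩

lemma impFrom_shift (x c : Int) (t : List Int) :
    (impFrom x c t = true) ↔
      (∃ k : Nat, 1 ≤ k ∧ k + 1 < (x :: c :: t).length ∧
        ((x :: c :: t).getD k 0 - (x :: c :: t).getD (k + 1) 0).natAbs ≠ 1 ∧
        (x - (x :: c :: t).getD (k + 1) 0).natAbs = 1) := by
  rw [impFrom_iff]
  constructor
  · rintro ⟨k, hlen, h1, h2⟩
    exact ⟨k + 1, by omega, by simpa using hlen, by simpa using h1, by simpa using h2⟩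
  · rintro ⟨k, hk1, hlen, h1, h2⟩
    cases k with
    | zero => omega
    | succ k' => exact ⟨k', by simpa using hlen, by simpa using h1, by simpa using h2⟩

theorem main_eq (x : Int) (xs : List Int) :
    top_heuristic_raw (x :: xs) = top_heuristic_raw_alt (x :: xs) := by
  have hne : (x :: xs) ≠ [] := by simp
  have hbase := pvGapRaw_eq' (x :: xs) hne
  have hneg : PySem.List.pyGetD (x :: xs) (-1) 0 = (x :: xs).getLast?.getD 0 := by
    rw [PySem.List.pyGetD_neg_one _ 0 hne, List.getLast?_eq_some_getLast hne]
    rfl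
  have hst := foldB_start x x xs
  simp only [top_heuristic_raw, top_heuristic_raw_alt, PySem.List.slice_from_one,
    List.tail_cons, PySem.List.pyGetD_zero_cons, hneg]
  rw [hst.1, hst.2]
  by_cases hpen : (x :: xs).getLast?.getD 0 ≠ ((x :: xs).length : Int)
  · rw [if_pos hpen]
    have hb : pvGapRaw (x :: xs) = gapPairs (x :: xs) + 1 := by
      rw [hbase, if_pos hpen]
    cases xs with
    | nil =>
      have hany : (PySem.List.pyRange 1 (([x] : List Int).length : Int) 1) = [] := by
        apply PySem.List.pyRange_one_eq_nil; simp
      have hx1 : x ≠ (1 : Int) := by simpa using hpen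
      rw [hany, hb]
      simp [gapPairs, hx1]
    | cons c t =>
      have hany := anyA_iff x (c :: t)
      have himp := impFrom_shift x c t
      rw [hb]
      have hbne : gapPairs (x :: c :: t) + 1 ≠ 0 := by
        have := gapPairs_nonneg (x :: c :: t); omega
      rw [if_neg hbne, if_neg hbne]
      have hbooleq : ((PySem.List.pyRange 1 (((x :: c :: t).length : Int)) 1).any (fun i =>
          pvGapRaw ((PySem.List.slice (x :: c :: t) none (some (i + 1))).reverse ++
                    PySem.List.slice (x :: c :: t) (some (i + 1)) none) < gapPairs (x :: c :: t) + 1))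
          = (impFrom x c t || (x == ((x :: c :: t).length : Int))) := by
        rw [Bool.eq_iff_iff]
        rw [← hb, hany]
        unfold MidCond
        rw [Bool.or_eq_true, himp, beq_iff_eq]
        constructor
        · rintro (h | ⟨_, _, h3⟩)
          · exact Or.inl h
          · exact Or.inr h3
        · rintro (h | h)
          · exact Or.inl h
          · exact Or.inr ⟨by simp, hpen, h⟩
      rw [hbooleq]
  · rw [if_neg hpen]
    have hb : pvGapRaw (x :: xs) = gapPairs (x :: xs) := by
      rw [hbase, if_neg hpen]; ring
    by_cases hz : gapPairs (x :: xs) = 0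
    · rw [hb, if_pos hz, if_pos hz]
    · rw [hb, if_neg hz, if_neg hz]
      cases xs with
      | nil =>
        have hany : (PySem.List.pyRange 1 (([x] : List Int).length : Int) 1) = [] := by
          apply PySem.List.pyRange_one_eq_nil; simp
        simp [gapPairs] at hz
      | cons c t =>
        have hany := anyA_iff x (c :: t)
        have himp := impFrom_shift x c t
        have hbooleq : ((PySem.List.pyRange 1 (((x :: c :: t).length : Int)) 1).any (fun i =>
            pvGapRaw ((PySem.List.slice (x :: c :: t) none (some (i + 1))).reverse ++
                      PySem.List.slice (x :: c :: t) (some (i + 1)) none) < gapPairs (x :: c :: t)))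
            = impFrom x c t := by
          rw [Bool.eq_iff_iff]
          rw [← hb, hany]
          unfold MidCond
          rw [himp]
          constructor
          · rintro (h | ⟨_, h2, _⟩)
            · exact h
            · exact absurd h2 (by simpa using hpen)
          · exact fun h => Or.inl h
        rw [hbooleq]

-- ===== VERDICT (by name: the statement is the Claim_ definition above) =====
theorem top_heuristic_raw_spec : Claim_equal_top_heuristic_raw := by
  intro stack _ hpre
  unfold Spec_top_heuristic_raw
  cases stack with
  | nil => exact absurd rfl hpre
  | cons x xs => exact main_eq x xs
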